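-- pv_equiv track=rewrite | github.com/Ag3497120/verantyx-v6 | arc/world_commands.py | _paste
-- ===== SOURCE A (Python) =====
-- def _copy(g):
--     return [row[:] for row in g]
--
-- def _paste(g, patch, r0, c0, bg):
--     res = _copy(g)
--     ph,pw = len(patch), len(patch[0])
--     h,w = len(g), len(g[0])
--     for r in range(ph):
--         for c in range(pw):
--             nr,nc = r0+r, c0+c
--             if 0<=nr<h and 0<=nc<w and patch[r][c] != bg:
--                 res[nr][nc] = patch[r][c]
--     return res
-- ===== SOURCE B (Python) =====
-- def _paste(g, patch, r0, c0, bg):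
--     ph, pw = len(patch), len(patch[0])
--     h, w = len(g), len(g[0])
--     return [
--         [
--             patch[r - r0][c - c0]
--             if c < w and 0 <= r - r0 < ph and 0 <= c - c0 < pw and patch[r - r0][c - c0] != bg
--             else x
--             for c, x in enumerate(row)
--         ]
--         for r, row in enumerate(g)
--     ]
-- ===== Notes on version B (the rewrite author's own statement) =====
-- stated objective: alternative
-- what changed: B builds the result in one pass as a nested comprehension over the existing grid cells (enumerate), mapping each output cell back into the patch, instead of copying the grid and then scattering patch cells into the mutable copy.
import Mathlib
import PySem

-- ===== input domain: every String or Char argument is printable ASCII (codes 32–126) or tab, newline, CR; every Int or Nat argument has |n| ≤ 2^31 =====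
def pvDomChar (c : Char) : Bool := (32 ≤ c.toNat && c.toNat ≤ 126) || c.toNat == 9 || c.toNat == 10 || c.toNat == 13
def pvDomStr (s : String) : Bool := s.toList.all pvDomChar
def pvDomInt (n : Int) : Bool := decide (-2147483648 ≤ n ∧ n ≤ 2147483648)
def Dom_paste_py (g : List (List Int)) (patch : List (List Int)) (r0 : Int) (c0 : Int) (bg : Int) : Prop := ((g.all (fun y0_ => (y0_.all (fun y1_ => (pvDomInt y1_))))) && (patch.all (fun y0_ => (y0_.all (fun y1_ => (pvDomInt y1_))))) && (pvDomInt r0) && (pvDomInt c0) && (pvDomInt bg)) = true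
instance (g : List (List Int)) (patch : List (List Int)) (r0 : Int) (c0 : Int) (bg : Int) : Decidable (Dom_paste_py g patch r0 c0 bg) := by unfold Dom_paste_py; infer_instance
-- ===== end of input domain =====

-- B builds the result in one pass over the existing grid cells (enumerate + comprehension,
-- mapping each cell back into the patch) instead of A's copy-then-scatter into a mutable grid.
-- Equivalence of the RETURN value is proved on every input where A returns (Pre_).

-- ===== PORT A =====
-- res[nr][nc] = v  (List.set/modify are identity out of range; under Pre_ the Python
-- assignment is always in range when it happens, so this is exact)
def setCell (res : List (List Int)) (i j : Nat) (v : Int) : List (List Int) :=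
  res.modify i (fun row => row.set j v)

def paste_py (g : List (List Int)) (patch : List (List Int)) (r0 : Int) (c0 : Int) (bg : Int) : List (List Int) :=
  let res := g   -- _copy(g): lists are immutable here, updates below go through setCell
  let ph := patch.length
  let pw := (patch.headD []).length   -- len(patch[0]); exact since Pre_ requires patch ≠ [] (Python raises IndexError on [])
  let h := g.length
  let w := (g.headD []).length        -- len(g[0]); exact since Pre_ requires g ≠ []
  (List.range ph).foldl (fun res (r : Nat) =>
    (List.range pw).foldl (fun res (c : Nat) =>
      let nr := r0 + (r : Int)
      let nc := c0 + (c : Int)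
      -- patch[r][c]: getD is exact here since Pre_ puts the read in range whenever the bounds conjuncts hold
      if 0 ≤ nr ∧ nr < (h : Int) ∧ 0 ≤ nc ∧ nc < (w : Int) ∧ (patch.getD r []).getD c 0 ≠ bg then
        setCell res nr.toNat nc.toNat ((patch.getD r []).getD c 0)
      else res) res) res

-- ===== PORT B =====
def paste_py_alt (g : List (List Int)) (patch : List (List Int)) (r0 : Int) (c0 : Int) (bg : Int) : List (List Int) :=
  let ph := patch.length
  let pw := (patch.headD []).length   -- len(patch[0]); exact since Pre_ requires patch ≠ []
  let h := g.length                   -- computed as in the Python (unused there too)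
  let w := (g.headD []).length        -- len(g[0]); exact since Pre_ requires g ≠ []
  (PySem.List.enumerate g).map (fun rrow =>
    (PySem.List.enumerate rrow.2).map (fun cx =>
      let pr := rrow.1 - r0
      let pc := cx.1 - c0
      -- patch[pr][pc]: only used when the bounds conjuncts hold, where getD/toNat are exact
      let v := (patch.getD pr.toNat []).getD pc.toNat 0
      if cx.1 < (w : Int) ∧ 0 ≤ pr ∧ pr < (ph : Int) ∧ 0 ≤ pc ∧ pc < (pw : Int) ∧ v ≠ bg then v
      else cx.2))

-- ===== PRECONDITION & SPEC =====
-- Pre_ is exactly the set of inputs on which the Python A returns: g and patch non-empty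
-- (len(g[0])/len(patch[0]) raise IndexError otherwise), and every patch read / grid write
-- that the loop actually performs is within the (possibly ragged) row it indexes
-- (otherwise the Python raises IndexError).
def Pre_paste_py (g : List (List Int)) (patch : List (List Int)) (r0 : Int) (c0 : Int) (bg : Int) : Prop :=
  g ≠ [] ∧ patch ≠ [] ∧
  ∀ r, r < patch.length → ∀ c, c < (patch.headD []).length →
    (0 ≤ r0 + (r : Int) ∧ r0 + (r : Int) < (g.length : Int) ∧
     0 ≤ c0 + (c : Int) ∧ c0 + (c : Int) < ((g.headD []).length : Int)) →
      c < (patch.getD r []).length ∧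
      ((patch.getD r []).getD c 0 ≠ bg →
        c0 + (c : Int) < ((g.getD (r0 + (r : Int)).toNat []).length : Int))
instance (g : List (List Int)) (patch : List (List Int)) (r0 : Int) (c0 : Int) (bg : Int) : Decidable (Pre_paste_py g patch r0 c0 bg) := by unfold Pre_paste_py; infer_instance

def pvWitness_paste_py : List (List Int) × List (List Int) × Int × Int × Int :=
  ([[1, 2], [3, 4]], [[5]], 0, 1, 0)

def Spec_paste_py (g : List (List Int)) (patch : List (List Int)) (r0 : Int) (c0 : Int) (bg : Int) (out : List (List Int)) : Prop := out = paste_py_alt g patch r0 c0 bg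
instance (g : List (List Int)) (patch : List (List Int)) (r0 : Int) (c0 : Int) (bg : Int) (out : List (List Int)) : Decidable (Spec_paste_py g patch r0 c0 bg out) := by unfold Spec_paste_py; infer_instance

-- ===== CLAIM (what is proved, stated in full; the proofs are below) =====
def Claim_equal_paste_py : Prop := ∀ (g : List (List Int)) (patch : List (List Int)) (r0 : Int) (c0 : Int) (bg : Int), Dom_paste_py g patch r0 c0 bg → Pre_paste_py g patch r0 c0 bg → Spec_paste_py g patch r0 c0 bg (paste_py g patch r0 c0 bg)

-- ===== LEMMAS AND PROOFS =====

-- the fold keeps the outer length and every row length of the start grid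
def RowLen (res res0 : List (List Int)) : Prop :=
  res.length = res0.length ∧ ∀ i, (res.getD i []).length = (res0.getD i []).length

theorem setCell_length (res : List (List Int)) (a b : Nat) (v : Int) :
    (setCell res a b v).length = res.length := by
  simp [setCell]

theorem getD_row_setCell (res : List (List Int)) (a b : Nat) (v : Int) (i : Nat) :
    ((setCell res a b v).getD i []) = if i = a then (res.getD i []).set b v else res.getD i [] := by
  by_cases hi : i < res.length
  · have hi' : i < (setCell res a b v).length := by simpa [setCell_length] using hi
    rw [List.getD_eq_getElem _ _ hi', List.getD_eq_getElem _ _ hi]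
    simp [setCell, List.getElem_modify]
    split_ifs with h1 h2 h2 <;> simp_all [eq_comm]
  · have hi' : ¬ i < (setCell res a b v).length := by simpa [setCell_length] using hi
    rw [List.getD_eq_default _ _ (by omega), List.getD_eq_default _ _ (by omega)]
    simp

theorem setCell_rowlen (res : List (List Int)) (a b : Nat) (v : Int) :
    RowLen (setCell res a b v) res := by
  refine ⟨setCell_length res a b v, fun i => ?_⟩
  rw [getD_row_setCell]
  split_ifs <;> simp [List.length_set]

theorem getD_setCell (res : List (List Int)) (a b : Nat) (v : Int) (i j : Nat) :
    ((setCell res a b v).getD i []).getD j 0 =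
      if i = a ∧ j = b ∧ b < (res.getD a []).length then v
      else (res.getD i []).getD j 0 := by
  rw [getD_row_setCell]
  by_cases hia : i = a
  · subst hia
    rw [if_pos rfl]
    by_cases hjb : j = b
    · subst hjb
      by_cases hbl : j < (res.getD i []).length
      · rw [List.getD_eq_getElem _ _ (by rw [List.length_set]; exact hbl), List.getElem_set,
          if_pos rfl, if_pos ⟨rfl, rfl, hbl⟩]
      · rw [if_neg (fun hq : i = i ∧ j = j ∧ j < (res.getD i []).length => hbl hq.2.2),
          List.getD_eq_default _ _ (by rw [List.length_set]; omega),
          List.getD_eq_default _ _ (by omega)]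
    · rw [if_neg (fun hq : i = i ∧ j = b ∧ b < (res.getD i []).length => hjb hq.2.1)]
      by_cases hj : j < (res.getD i []).length
      · rw [List.getD_eq_getElem _ _ (by rw [List.length_set]; exact hj),
          List.getD_eq_getElem _ _ hj, List.getElem_set, if_neg (fun h => hjb h.symm)]
      · rw [List.getD_eq_default _ _ (by rw [List.length_set]; omega),
          List.getD_eq_default _ _ (by omega)]
  · rw [if_neg hia, if_neg (fun hq : i = a ∧ j = b ∧ b < (res.getD a []).length => hia hq.1)]

-- the body of A's inner loop, row r fixed
def innerStep (patch : List (List Int)) (r0 c0 bg : Int) (h w : Nat) (r : Nat)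
    (res : List (List Int)) (c : Nat) : List (List Int) :=
  let nr := r0 + (r : Int)
  let nc := c0 + (c : Int)
  if 0 ≤ nr ∧ nr < (h : Int) ∧ 0 ≤ nc ∧ nc < (w : Int) ∧ (patch.getD r []).getD c 0 ≠ bg then
    setCell res nr.toNat nc.toNat ((patch.getD r []).getD c 0)
  else res

theorem innerFold_rowlen (patch : List (List Int)) (r0 c0 bg : Int) (h w : Nat) (r : Nat)
    (k : Nat) (res : List (List Int)) :
    RowLen ((List.range k).foldl (innerStep patch r0 c0 bg h w r) res) res := by
  induction k with
  | zero => exact ⟨rfl, fun _ => rfl⟩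
  | succ k ih =>
    rw [List.range_succ, List.foldl_append, List.foldl_cons, List.foldl_nil]
    simp only [innerStep]
    split_ifs
    · have h2 := setCell_rowlen ((List.range k).foldl (innerStep patch r0 c0 bg h w r) res)
        ((r0 + (r : Int)).toNat) ((c0 + (k : Int)).toNat) ((patch.getD r []).getD k 0)
      exact ⟨h2.1.trans ih.1, fun i => (h2.2 i).trans (ih.2 i)⟩
    · exact ih

theorem innerFold_cell (patch : List (List Int)) (r0 c0 bg : Int) (h w : Nat) (r : Nat)
    (k : Nat) (res : List (List Int)) (i j : Nat) :
    ((((List.range k).foldl (innerStep patch r0 c0 bg h w r) res)).getD i []).getD j 0 =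
      if (i : Int) = r0 + (r : Int) ∧ (i : Int) < (h : Int) ∧ 0 ≤ (j : Int) - c0 ∧
         (j : Int) - c0 < (k : Int) ∧ (j : Int) < (w : Int) ∧ j < (res.getD i []).length ∧
         (patch.getD r []).getD ((j : Int) - c0).toNat 0 ≠ bg then
        (patch.getD r []).getD ((j : Int) - c0).toNat 0
      else (res.getD i []).getD j 0 := by
  induction k with
  | zero =>
    simp only [List.range_zero, List.foldl_nil]
    rw [if_neg]
    rintro ⟨-, -, a3, a4, -⟩
    omega
  | succ k ih =>
    rw [List.range_succ, List.foldl_append, List.foldl_cons, List.foldl_nil]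
    have hRL := innerFold_rowlen patch r0 c0 bg h w r k res
    simp only [innerStep]
    by_cases hc : 0 ≤ r0 + (r : Int) ∧ r0 + (r : Int) < (h : Int) ∧ 0 ≤ c0 + (k : Int) ∧
        c0 + (k : Int) < (w : Int) ∧ (patch.getD r []).getD k 0 ≠ bg
    · rw [if_pos hc, getD_setCell]
      obtain ⟨h1, h2, h3, h4, h5⟩ := hc
      rw [hRL.2 ((r0 + (r : Int)).toNat)]
      by_cases hij : i = (r0 + (r : Int)).toNat ∧ j = (c0 + (k : Int)).toNat ∧
          (c0 + (k : Int)).toNat < (res.getD ((r0 + (r : Int)).toNat) []).length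
      · rw [if_pos hij]
        obtain ⟨hi1, hj1, hb1⟩ := hij
        subst hi1
        subst hj1
        have e1 : (((c0 + (k : Int)).toNat : Int) - c0).toNat = k := by omega
        rw [if_pos ⟨by omega, by omega, by omega, by omega, by omega, hb1,
          by rw [e1]; exact h5⟩, e1]
      · rw [if_neg hij, ih]
        apply if_congr _ rfl rfl
        constructor
        · rintro ⟨a1, a2, a3, a4, a5, a6, a7⟩
          exact ⟨a1, a2, a3, by push_cast at a4 ⊢; omega, a5, a6, a7⟩
        · rintro ⟨a1, a2, a3, a4, a5, a6, a7⟩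
          refine ⟨a1, a2, a3, ?_, a5, a6, a7⟩
          by_contra hlt
          have ejk : (j : Int) - c0 = (k : Int) := by push_cast at a4 hlt; omega
          have ei : i = (r0 + (r : Int)).toNat := by omega
          have ej : j = (c0 + (k : Int)).toNat := by omega
          exact hij ⟨ei, ej, by rw [← ei, ← ej]; exact a6⟩
    · rw [if_neg hc, ih]
      apply if_congr _ rfl rfl
      constructor
      · rintro ⟨a1, a2, a3, a4, a5, a6, a7⟩
        exact ⟨a1, a2, a3, by push_cast at a4 ⊢; omega, a5, a6, a7⟩
      · rintro ⟨a1, a2, a3, a4, a5, a6, a7⟩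
        refine ⟨a1, a2, a3, ?_, a5, a6, a7⟩
        by_cases hl : (j : Int) - c0 < (k : Int)
        · exact hl
        · exfalso
          apply hc
          have ejk : (j : Int) - c0 = (k : Int) := by push_cast at a4 hl; omega
          have e1 : ((j : Int) - c0).toNat = k := by omega
          rw [e1] at a7
          exact ⟨by omega, by omega, by omega, by omega, a7⟩

def outerStep (patch : List (List Int)) (r0 c0 bg : Int) (h w pw : Nat)
    (res : List (List Int)) (r : Nat) : List (List Int) :=
  (List.range pw).foldl (innerStep patch r0 c0 bg h w r) res

theorem outerFold_rowlen (patch : List (List Int)) (r0 c0 bg : Int) (h w pw : Nat)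
    (k : Nat) (res : List (List Int)) :
    RowLen ((List.range k).foldl (outerStep patch r0 c0 bg h w pw) res) res := by
  induction k with
  | zero => exact ⟨rfl, fun _ => rfl⟩
  | succ k ih =>
    rw [List.range_succ, List.foldl_append, List.foldl_cons, List.foldl_nil]
    have h2 := innerFold_rowlen patch r0 c0 bg h w k pw
        ((List.range k).foldl (outerStep patch r0 c0 bg h w pw) res)
    exact ⟨h2.1.trans ih.1, fun i => (h2.2 i).trans (ih.2 i)⟩

theorem outerFold_cell (patch : List (List Int)) (r0 c0 bg : Int) (h w pw : Nat)
    (k : Nat) (res : List (List Int)) (i j : Nat) :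
    ((((List.range k).foldl (outerStep patch r0 c0 bg h w pw) res)).getD i []).getD j 0 =
      if 0 ≤ (i : Int) - r0 ∧ (i : Int) - r0 < (k : Int) ∧ (i : Int) < (h : Int) ∧
         0 ≤ (j : Int) - c0 ∧ (j : Int) - c0 < (pw : Int) ∧ (j : Int) < (w : Int) ∧
         j < (res.getD i []).length ∧
         (patch.getD ((i : Int) - r0).toNat []).getD ((j : Int) - c0).toNat 0 ≠ bg then
        (patch.getD ((i : Int) - r0).toNat []).getD ((j : Int) - c0).toNat 0
      else (res.getD i []).getD j 0 := by
  induction k with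
  | zero =>
    simp only [List.range_zero, List.foldl_nil]
    rw [if_neg]
    rintro ⟨a1, a2, -⟩
    omega
  | succ k ih =>
    rw [List.range_succ, List.foldl_append, List.foldl_cons, List.foldl_nil]
    have hRL := outerFold_rowlen patch r0 c0 bg h w pw k res
    show ((((List.range pw).foldl (innerStep patch r0 c0 bg h w k) _)).getD i []).getD j 0 = _
    rw [innerFold_cell patch r0 c0 bg h w k pw _ i j, hRL.2 i, ih]
    by_cases hrow : (i : Int) = r0 + (k : Int)
    · have e1 : ((i : Int) - r0).toNat = k := by omega
      have hin : ¬ (0 ≤ (i : Int) - r0 ∧ (i : Int) - r0 < (k : Int) ∧ (i : Int) < (h : Int) ∧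
          0 ≤ (j : Int) - c0 ∧ (j : Int) - c0 < (pw : Int) ∧ (j : Int) < (w : Int) ∧
          j < (res.getD i []).length ∧
          (patch.getD ((i : Int) - r0).toNat []).getD ((j : Int) - c0).toNat 0 ≠ bg) := by
        rintro ⟨-, a2, -⟩
        omega
      rw [if_neg hin, e1]
      apply if_congr _ rfl rfl
      constructor
      · rintro ⟨a1, a2, a3, a4, a5, a6, a7⟩
        exact ⟨by omega, by push_cast; omega, a2, a3, a4, a5, a6, a7⟩
      · rintro ⟨a1, a2, a3, a4, a5, a6, a7, a8⟩
        exact ⟨hrow, a3, a4, a5, a6, a7, a8⟩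
    · rw [if_neg (fun hcc => hrow hcc.1)]
      apply if_congr _ rfl rfl
      constructor
      · rintro ⟨a1, a2, a3, a4, a5, a6, a7, a8⟩
        exact ⟨a1, by push_cast at a2 ⊢; omega, a3, a4, a5, a6, a7, a8⟩
      · rintro ⟨a1, a2, a3, a4, a5, a6, a7, a8⟩
        refine ⟨a1, ?_, a3, a4, a5, a6, a7, a8⟩
        by_cases hl : (i : Int) - r0 < (k : Int)
        · exact hl
        · exfalso
          apply hrow
          push_cast at a2
          omega

-- ===== VERDICT (by name: the statement is the Claim_ definition above) =====
theorem paste_py_spec : Claim_equal_paste_py := by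
  intro g patch r0 c0 bg _ _
  unfold Spec_paste_py
  have hA : paste_py g patch r0 c0 bg =
      (List.range patch.length).foldl
        (outerStep patch r0 c0 bg g.length (g.headD []).length (patch.headD []).length) g := rfl
  have hRL := outerFold_rowlen patch r0 c0 bg g.length (g.headD []).length
      (patch.headD []).length patch.length g
  rw [hA]
  unfold paste_py_alt
  apply List.ext_getElem
  · rw [hRL.1]
    simp [PySem.List.length_enumerate]
  intro i h1 h2
  have hig : i < g.length := by rw [hRL.1] at h1; exact h1
  simp only [List.getElem_map, PySem.List.getElem_enumerate]
  apply List.ext_getElem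
  · have e := hRL.2 i
    rw [List.getD_eq_getElem _ _ h1, List.getD_eq_getElem _ _ hig] at e
    rw [e]
    simp [PySem.List.length_enumerate]
  intro j h3 h4
  have hjr : j < (g.getD i []).length := by
    have e := hRL.2 i
    rw [List.getD_eq_getElem _ _ h1] at e
    rw [e] at h3
    exact h3
  have eL : ((List.range patch.length).foldl
        (outerStep patch r0 c0 bg g.length (g.headD []).length (patch.headD []).length) g)[i][j] =
      (((List.range patch.length).foldl
        (outerStep patch r0 c0 bg g.length (g.headD []).length (patch.headD []).length) g).getD i []).getD j 0 := by
    rw [List.getD_eq_getElem _ _ h1, List.getD_eq_getElem _ _ h3]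
  rw [eL, outerFold_cell patch r0 c0 bg g.length (g.headD []).length (patch.headD []).length
      patch.length g i j]
  simp only [List.getElem_map, PySem.List.getElem_enumerate, zero_add]
  have hjr' : j < (g[i]'hig).length := by
    rw [← List.getD_eq_getElem _ ([]) hig]
    exact hjr
  have eR : (g.getD i []).getD j 0 = (g[i]'hig)[j]'hjr' := by
    rw [List.getD_eq_getElem _ ([]) hig, List.getD_eq_getElem _ _ hjr']
  rw [eR]
  apply if_congr _ rfl rfl
  constructor
  · rintro ⟨a1, a2, a3, a4, a5, a6, a7, a8⟩
    exact ⟨a6, a1, a2, a4, a5, a8⟩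
  · rintro ⟨b1, b2, b3, b4, b5, b6⟩
    exact ⟨b2, b3, by omega, b4, b5, b1, hjr, b6⟩
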